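-- pv_equiv track=rewrite | github.com/MatcomOnlineGrader/judge | mog/ratings.py | reassign_ranks
-- ===== SOURCE A (Python) =====
-- def reassign_ranks(ranks):
--     """
--     When some users are tied with other users, assigns the average of the
--     positions covered by the tied users
--     """
--     cur = 0
--     num_coders = len(ranks)
--     new_ranks = []
--
--     while cur < num_coders:
--         cnt = 0
--         while cur + cnt < num_coders and ranks[cur + cnt] == ranks[cur]:
--             cnt += 1
--         rank = ranks[cur] + cnt - 1
--         new_ranks += [rank] * cnt
--         cur += cnt
--
--     return new_ranks
-- ===== SOURCE B (Python) =====
-- def reassign_ranks(ranks):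
--     """Per-element formulation: each element's new rank is its own value plus
--     the number of equal neighbours stretching to its left plus the number
--     stretching to its right (no runs are materialised)."""
--     def left_runs(xs):
--         # out[i] = length of the stretch of equal values immediately left of xs[i]
--         out = [0] if xs else []
--         for prev, v in zip(xs, xs[1:]):
--             out.append(out[-1] + 1 if prev == v else 0)
--         return out
--     before = left_runs(ranks)
--     after = list(reversed(left_runs(list(reversed(ranks)))))
--     return [v + b + a for v, b, a in zip(ranks, before, after)]
-- ===== Notes on version B (the rewrite author's own statement) =====
-- stated objective: alternative
-- what changed: Replaces A's run-grouping while loops by a per-element formulation: two symmetric neighbour-equality scans (over zipped adjacent pairs) compute for every position how many equal values stretch left and right, and each output element is value + left + right; no runs are grouped or counted by index.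
import Mathlib
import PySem

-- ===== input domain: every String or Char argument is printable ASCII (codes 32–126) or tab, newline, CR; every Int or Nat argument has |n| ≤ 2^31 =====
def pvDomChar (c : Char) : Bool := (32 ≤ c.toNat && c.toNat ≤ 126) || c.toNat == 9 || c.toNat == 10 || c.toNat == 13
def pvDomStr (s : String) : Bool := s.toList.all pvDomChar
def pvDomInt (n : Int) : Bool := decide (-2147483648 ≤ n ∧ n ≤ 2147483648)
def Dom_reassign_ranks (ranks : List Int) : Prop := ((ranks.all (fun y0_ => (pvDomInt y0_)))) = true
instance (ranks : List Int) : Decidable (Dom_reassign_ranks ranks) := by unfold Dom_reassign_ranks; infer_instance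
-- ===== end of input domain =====

-- B replaces A's run-grouping while loops by a per-element formulation (left/right neighbour-equality scans); alternative decomposition, same cost.


-- ===== PORT A =====
-- inner while loop: counts the run of elements equal to ranks[cur] starting at cur+cnt
-- (indices are in range under the guard, so getD is exact for ranks[cur+cnt])
def rrCount (ranks : List Int) (cur cnt : Nat) : Nat :=
  if cur + cnt < ranks.length ∧ ranks.getD (cur + cnt) 0 = ranks.getD cur 0 then
    rrCount ranks cur (cnt + 1)
  else cnt
termination_by ranks.length - (cur + cnt)
decreasing_by omega

theorem rrCount_ge (ranks : List Int) (cur cnt : Nat) : cnt ≤ rrCount ranks cur cnt := by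
  fun_induction rrCount with
  | case1 cnt h ih => omega
  | case2 cnt h => omega

theorem rrCount_pos (ranks : List Int) (cur : Nat) (h : cur < ranks.length) :
    1 ≤ rrCount ranks cur 0 := by
  rw [rrCount]
  simp only [Nat.add_zero, h, true_and]
  exact rrCount_ge ranks cur 1

-- outer while loop over cur
def rrLoop (ranks : List Int) (new_ranks : List Int) (cur : Nat) : List Int :=
  if h : cur < ranks.length then
    let cnt := rrCount ranks cur 0
    let rank : Int := ranks.getD cur 0 + (cnt : Int) - 1
    rrLoop ranks (new_ranks ++ List.replicate cnt rank) (cur + cnt)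
  else new_ranks
termination_by ranks.length - cur
decreasing_by have := rrCount_pos ranks cur h; omega

def reassign_ranks (ranks : List Int) : List Int :=
  rrLoop ranks [] 0

-- ===== PORT B =====
-- left_runs: out[i] = length of the stretch of equal values immediately left of xs[i];
-- zip(xs, xs[1:]) is the list of adjacent pairs (xs[1:] of a list = its tail)
def lruns (xs : List Int) : List Int :=
  (xs.zip xs.tail).foldl
    (fun out pv => out ++ [if pv.1 = pv.2 then out.getLastD 0 + 1 else 0])
    (if xs.isEmpty then [] else [0])

def reassign_ranks_alt (ranks : List Int) : List Int :=
  let before := lruns ranks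
  let after := (lruns ranks.reverse).reverse
  (ranks.zip (before.zip after)).map (fun x => x.1 + x.2.1 + x.2.2)

-- ===== PRECONDITION & SPEC =====
def Spec_reassign_ranks (ranks : List Int) (out : List Int) : Prop := out = reassign_ranks_alt ranks
instance (ranks : List Int) (out : List Int) : Decidable (Spec_reassign_ranks ranks out) := by unfold Spec_reassign_ranks; infer_instance

-- ===== CLAIM (what is proved, stated in full; the proofs are below) =====
def Claim_equal_reassign_ranks : Prop := ∀ (ranks : List Int), Dom_reassign_ranks ranks → Spec_reassign_ranks ranks (reassign_ranks ranks)

-- ===== LEMMAS AND PROOFS =====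

-- number of leading elements of l equal to v
def leadCount (v : Int) : List Int → Nat
  | [] => 0
  | u :: t => if u = v then leadCount v t + 1 else 0

-- reference function: process the head run, recurse on the rest
def rrRef (l : List Int) : List Int :=
  match l with
  | [] => []
  | v :: t =>
    List.replicate (leadCount v t + 1) (v + ((leadCount v t + 1 : Nat) : Int) - 1) ++
      rrRef (t.drop (leadCount v t))
termination_by l.length
decreasing_by simp

theorem rrCount_eq (ranks : List Int) (cur cnt : Nat) :
    rrCount ranks cur cnt = cnt + leadCount (ranks.getD cur 0) (ranks.drop (cur + cnt)) := by
  fun_induction rrCount with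
  | case1 cnt h ih =>
    obtain ⟨hl, he⟩ := h
    rw [ih, List.drop_eq_getElem_cons hl]
    simp only [leadCount, List.getD_eq_getElem?_getD, List.getElem?_eq_getElem hl,
      Option.getD_some] at he ⊢
    rw [if_pos he]
    have : cur + (cnt + 1) = cur + cnt + 1 := by omega
    rw [this]
    omega
  | case2 cnt h =>
    rcases Nat.lt_or_ge (cur + cnt) ranks.length with hl | hl
    · have he : ¬ ranks.getD (cur + cnt) 0 = ranks.getD cur 0 := by tauto
      rw [List.drop_eq_getElem_cons hl]
      simp only [leadCount, List.getD_eq_getElem?_getD, List.getElem?_eq_getElem hl,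
        Option.getD_some] at he ⊢
      rw [if_neg he]
      omega
    · rw [List.drop_eq_nil_of_le hl]
      simp [leadCount]

theorem rrLoop_eq (ranks : List Int) (new_ranks : List Int) (cur : Nat) :
    rrLoop ranks new_ranks cur = new_ranks ++ rrRef (ranks.drop cur) := by
  fun_induction rrLoop with
  | case1 new_ranks cur h cnt rank ih =>
    rw [ih]
    have hdrop := List.drop_eq_getElem_cons h
    have hget : ranks.getD cur 0 = ranks[cur] := by
      simp [List.getD_eq_getElem?_getD, List.getElem?_eq_getElem h]
    have hc : cnt = leadCount ranks[cur] (ranks.drop (cur + 1)) + 1 := by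
      show rrCount ranks cur 0 = _
      rw [rrCount_eq, hget, Nat.add_zero, hdrop]
      simp [leadCount]
    have hr : rank = ranks[cur] + ((leadCount ranks[cur] (ranks.drop (cur + 1)) + 1 : Nat) : Int) - 1 := by
      show ranks.getD cur 0 + (cnt : Int) - 1 = _
      rw [hget, hc]
    have hd : ranks.drop (cur + (leadCount ranks[cur] (ranks.drop (cur + 1)) + 1)) =
        (ranks.drop (cur + 1)).drop (leadCount ranks[cur] (ranks.drop (cur + 1))) := by
      rw [List.drop_drop]
      congr 1
      omega
    rw [hdrop, rrRef, hc, hr, hd]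
    simp
  | case2 new_ranks cur h =>
    rw [List.drop_eq_nil_of_le (by omega), rrRef, List.append_nil]

-- functional spec of B's scan: lrSpec prev run t = tail of left_runs, given the previous
-- element and the current run length
def lrSpec (prev run : Int) : List Int → List Int
  | [] => []
  | v :: t => (if prev = v then run + 1 else 0) :: lrSpec v (if prev = v then run + 1 else 0) t

-- [0, 1, …, m-1] as integers
def rangeInt : Nat → List Int
  | 0 => []
  | k + 1 => 0 :: (rangeInt k).map (fun x => x + 1)

theorem rangeInt_length (m : Nat) : (rangeInt m).length = m := by
  induction m with
  | zero => rfl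
  | succ k ih => simp [rangeInt, ih]

theorem rangeInt_getElem (m i : Nat) (h : i < m) :
    (rangeInt m)[i]'(by rw [rangeInt_length]; exact h) = (i : Int) := by
  induction m generalizing i with
  | zero => omega
  | succ k ih =>
    cases i with
    | zero => rfl
    | succ j =>
      have hj : j < k := by omega
      have := ih j hj
      simp only [rangeInt, List.getElem_cons_succ, List.getElem_map, this]
      push_cast
      ring

theorem foldl_lr (t : List Int) (prev : Int) (out : List Int) (r : Int) :
    ((prev :: t).zip t).foldl
      (fun out pv => out ++ [if pv.1 = pv.2 then out.getLastD 0 + 1 else 0])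
      (out ++ [r]) = out ++ r :: lrSpec prev r t := by
  induction t generalizing prev out r with
  | nil => simp [lrSpec]
  | cons u t' ih =>
    simp only [List.zip_cons_cons, List.foldl_cons]
    have hlast : (out ++ [r]).getLastD 0 = r := by simp
    have heq : (out ++ [r]) ++ [if prev = u then (out ++ [r]).getLastD 0 + 1 else 0]
        = (out ++ [r]) ++ [if prev = u then r + 1 else 0] := by rw [hlast]
    rw [heq, ih]
    simp [lrSpec]

theorem lruns_cons (v : Int) (t : List Int) : lruns (v :: t) = 0 :: lrSpec v 0 t := by
  have h := foldl_lr t v [] 0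
  simpa [lruns] using h

theorem lrSpec_append (prev r : Int) (a b : List Int) :
    lrSpec prev r (a ++ b) =
      lrSpec prev r a ++ lrSpec (a.getLastD prev) ((lrSpec prev r a).getLastD r) b := by
  induction a generalizing prev r with
  | nil => simp [lrSpec]
  | cons u a' ih =>
    rw [List.cons_append]
    show (if prev = u then r + 1 else 0) :: lrSpec u (if prev = u then r + 1 else 0) (a' ++ b) = _
    rw [ih]
    rw [show lrSpec prev r (u :: a') = (if prev = u then r + 1 else 0) ::
      lrSpec u (if prev = u then r + 1 else 0) a' from rfl]
    rw [List.cons_append, List.getLastD_cons, List.getLastD_cons]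

theorem lrSpec_replicate (v r : Int) (k : Nat) :
    lrSpec v r (List.replicate k v) = (rangeInt k).map (fun i => r + i + 1) := by
  induction k generalizing r with
  | zero => rfl
  | succ k ih =>
    rw [List.replicate_succ]
    show (if v = v then r + 1 else 0) :: lrSpec v (if v = v then r + 1 else 0) (List.replicate k v) = _
    rw [if_pos rfl, ih]
    rw [show rangeInt (k + 1) = 0 :: (rangeInt k).map (fun x => x + 1) from rfl]
    simp only [List.map_cons, List.map_map]
    congr 1
    · ring
    · apply List.map_congr_left
      intro i _
      simp only [Function.comp_apply]
      ring

theorem lrSpec_replicate_getLastD (v r : Int) (k : Nat) (d : Int) :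
    (lrSpec v r (List.replicate k v)).getLastD d = if k = 0 then d else r + (k : Int) := by
  induction k generalizing r d with
  | zero => rfl
  | succ k ih =>
    rw [List.replicate_succ]
    show ((if v = v then r + 1 else 0) :: lrSpec v (if v = v then r + 1 else 0)
      (List.replicate k v)).getLastD d = _
    rw [if_pos rfl, List.getLastD_cons, ih]
    by_cases h : k = 0
    · subst h; simp
    · rw [if_neg h, if_neg (by omega : ¬ k + 1 = 0)]
      push_cast
      ring

theorem replicate_getLastD (v d : Int) (k : Nat) :
    (List.replicate k v).getLastD d = if k = 0 then d else v := by
  induction k generalizing d with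
  | zero => rfl
  | succ k ih =>
    rw [List.replicate_succ, List.getLastD_cons, ih]
    by_cases h : k = 0 <;> simp [h]

-- left_runs over a head run of length k+1 followed by a differing (or empty) rest
theorem lruns_run (v : Int) (k : Nat) (t2 : List Int)
    (h : ∀ w, t2.head? = some w → w ≠ v) :
    lruns (List.replicate (k + 1) v ++ t2) = rangeInt (k + 1) ++ lruns t2 := by
  rw [List.replicate_succ, List.cons_append, lruns_cons, lrSpec_append,
    lrSpec_replicate_getLastD, replicate_getLastD, lrSpec_replicate]
  have h1 : (if k = 0 then v else v) = v := by by_cases hk : k = 0 <;> simp [hk]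
  have h2 : (if k = 0 then (0 : Int) else 0 + (k : Int)) = (k : Int) := by
    by_cases hk : k = 0
    · subst hk; simp
    · rw [if_neg hk]; ring
  rw [h1, h2]
  have htail : lrSpec v (k : Int) t2 = lruns t2 := by
    cases t2 with
    | nil => rfl
    | cons w t2' =>
      have hw : ¬ (v = w) := fun he => (h w rfl) he.symm
      rw [lruns_cons]
      show (if v = w then (k : Int) + 1 else 0) :: lrSpec w (if v = w then (k : Int) + 1 else 0) t2' = _
      rw [if_neg hw]
  rw [htail]
  rw [show rangeInt (k + 1) = 0 :: (rangeInt k).map (fun x => x + 1) from rfl]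
  rw [List.cons_append]
  congr 2
  apply List.map_congr_left
  intro i _
  ring

-- left_runs over a prefix followed by a trailing run whose value differs from the prefix's last
theorem lruns_append_run (a : List Int) (v : Int) (k : Nat)
    (h : ∀ w, a.getLast? = some w → w ≠ v) :
    lruns (a ++ List.replicate (k + 1) v) = lruns a ++ rangeInt (k + 1) := by
  cases a with
  | nil =>
    rw [List.nil_append, show lruns ([] : List Int) = [] from rfl, List.nil_append]
    have := lruns_run v k [] (by intro w hw; cases hw)
    rw [List.append_nil, show lruns ([] : List Int) = [] from rfl, List.append_nil] at this
    exact this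
  | cons a0 a' =>
    rw [List.cons_append, lruns_cons, lrSpec_append, lruns_cons]
    have hne : ¬ (a'.getLastD a0 = v) := by
      apply h
      rw [List.getLastD_eq_getLast?, List.getLast?_cons]
    rw [List.replicate_succ]
    rw [show lrSpec (a'.getLastD a0) ((lrSpec a0 0 a').getLastD 0) (v :: List.replicate k v)
        = (if a'.getLastD a0 = v then (lrSpec a0 0 a').getLastD 0 + 1 else 0) ::
          lrSpec v (if a'.getLastD a0 = v then (lrSpec a0 0 a').getLastD 0 + 1 else 0)
            (List.replicate k v) from rfl]
    rw [if_neg hne, lrSpec_replicate]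
    rw [show rangeInt (k + 1) = 0 :: (rangeInt k).map (fun x => x + 1) from rfl]
    simp only [List.cons_append]
    congr 3
    apply List.map_congr_left
    intro i _
    ring

-- the run part of B's zip3-map collapses to A's replicate
theorem runPart (v : Int) (m : Nat) :
    ((List.replicate m v).zip ((rangeInt m).zip (rangeInt m).reverse)).map
      (fun x => x.1 + x.2.1 + x.2.2) = List.replicate m (v + (m : Int) - 1) := by
  apply List.ext_getElem
  · simp [rangeInt_length]
  · intro i h1 h2
    have hi : i < m := by simpa using h2
    simp only [List.getElem_map, List.getElem_zip, List.getElem_reverse, List.getElem_replicate]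
    have hlen : (rangeInt m).length = m := rangeInt_length m
    have e1 : (rangeInt m)[i]'(by omega) = (i : Int) := rangeInt_getElem m i hi
    have e2 : (rangeInt m)[(rangeInt m).length - 1 - i]'(by omega) = ((m - 1 - i : Nat) : Int) := by
      have hidx : (rangeInt m).length - 1 - i = m - 1 - i := by omega
      simp only [hidx]
      exact rangeInt_getElem m (m - 1 - i) (by omega)
    rw [e1, e2]
    omega

theorem leadCount_take (v : Int) (t : List Int) :
    t.take (leadCount v t) = List.replicate (leadCount v t) v := by
  induction t with
  | nil => rfl
  | cons u t' ih =>
    by_cases hu : u = v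
    · subst hu
      rw [show leadCount u (u :: t') = leadCount u t' + 1 from by simp [leadCount]]
      rw [List.take_succ_cons, List.replicate_succ, ih]
    · rw [show leadCount v (u :: t') = 0 from by simp [leadCount, hu]]
      rfl

theorem leadCount_drop_head (v : Int) (t : List Int) :
    ∀ w, (t.drop (leadCount v t)).head? = some w → w ≠ v := by
  induction t with
  | nil => intro w hw; cases hw
  | cons u t' ih =>
    by_cases hu : u = v
    · subst hu
      rw [show leadCount u (u :: t') = leadCount u t' + 1 from by simp [leadCount]]
      rw [List.drop_succ_cons]
      exact ih
    · rw [show leadCount v (u :: t') = 0 from by simp [leadCount, hu]]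
      intro w hw
      rw [List.drop_zero, List.head?_cons, Option.some_inj] at hw
      subst hw
      exact hu

theorem alt_eq_ref (l : List Int) : reassign_ranks_alt l = rrRef l := by
  fun_induction rrRef with
  | case1 => rfl
  | case2 v t ih =>
    set k := leadCount v t with hk
    set t2 := t.drop k with ht2
    have hsplit : v :: t = List.replicate (k + 1) v ++ t2 := by
      conv_lhs => rw [← List.take_append_drop k t]
      rw [leadCount_take, ← ht2, List.replicate_succ, List.cons_append]
    have hhead : ∀ w, t2.head? = some w → w ≠ v := leadCount_drop_head v t
    have hbefore : lruns (v :: t) = rangeInt (k + 1) ++ lruns t2 := by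
      rw [hsplit]; exact lruns_run v k t2 hhead
    have hrevlast : ∀ w, t2.reverse.getLast? = some w → w ≠ v := by
      intro w hw
      apply hhead w
      rwa [List.getLast?_reverse] at hw
    have hafter : lruns (v :: t).reverse = lruns t2.reverse ++ rangeInt (k + 1) := by
      rw [hsplit, List.reverse_append, List.reverse_replicate]
      exact lruns_append_run t2.reverse v k hrevlast
    show (( (v :: t).zip ((lruns (v :: t)).zip ((lruns (v :: t).reverse).reverse))).map
        (fun x => x.1 + x.2.1 + x.2.2)) = _
    rw [hbefore, hafter, List.reverse_append]
    rw [List.zip_append (by rw [rangeInt_length, List.length_reverse, rangeInt_length])]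
    rw [hsplit]
    rw [List.zip_append (by
      rw [List.length_replicate, List.length_zip, rangeInt_length, List.length_reverse,
        rangeInt_length, Nat.min_self])]
    rw [List.map_append, runPart]
    have htl : (t2.zip ((lruns t2).zip ((lruns t2.reverse).reverse))).map
        (fun x => x.1 + x.2.1 + x.2.2) = rrRef t2 := by
      rw [← ih]; rfl
    rw [htl]

-- ===== VERDICT (by name: the statement is the Claim_ definition above) =====
theorem reassign_ranks_spec : Claim_equal_reassign_ranks := by
  intro ranks _
  unfold Spec_reassign_ranks reassign_ranks
  rw [rrLoop_eq, alt_eq_ref, List.drop_zero, List.nil_append]
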